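-- pv_equiv track=rewrite | github.com/lincolnerickson/badgeapp | gui/main_window.py | _find_badge_number_column
-- ===== SOURCE A (Python) =====
-- def _find_badge_number_column(columns):
--     """Find the badge number column by looking for 'badge' in the name."""
--     for col in columns:
--         if "badge" in col.lower() and "num" in col.lower():
--             return col
--     for col in columns:
--         if "badge" in col.lower():
--             return col
--     return None
-- ===== SOURCE B (Python) =====
-- def _find_badge_number_column(columns):
--     fallback = None
--     for col in columns:
--         low = col.lower()
--         if "badge" in low:
--             if "num" in low:
--                 return col
--             if fallback is None:
--                 fallback = col
--     return fallback
-- ===== Notes on version B (the rewrite author's own statement) =====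
-- stated objective: faster
-- what changed: Replaces the two sequential scans (each lowercasing every column again) with a single pass that remembers the first badge-only column as a fallback and lowercases each column once.
import Mathlib
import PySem

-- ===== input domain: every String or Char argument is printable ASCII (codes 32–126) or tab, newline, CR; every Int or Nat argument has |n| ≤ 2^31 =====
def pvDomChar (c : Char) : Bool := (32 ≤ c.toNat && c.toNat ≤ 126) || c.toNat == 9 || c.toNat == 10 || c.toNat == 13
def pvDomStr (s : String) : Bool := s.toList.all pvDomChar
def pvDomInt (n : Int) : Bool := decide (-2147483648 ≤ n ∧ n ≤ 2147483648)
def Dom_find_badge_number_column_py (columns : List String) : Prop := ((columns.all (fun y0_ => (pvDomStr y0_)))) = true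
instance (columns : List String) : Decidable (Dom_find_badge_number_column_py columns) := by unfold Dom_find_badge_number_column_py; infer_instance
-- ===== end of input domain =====

-- B merges A's two scans into one pass with a remembered fallback (constant-factor: one pass, one lower() per column).
-- ===== PORT A =====
-- first loop of A: first col with 'badge' and 'num' in col.lower()
def pvALoop1 (columns : List String) : Option String :=
  match columns with
  | [] => none
  | col :: rest =>
    if PySem.Str.isIn "badge" (PySem.Str.lower col) && PySem.Str.isIn "num" (PySem.Str.lower col) then some col
    else pvALoop1 rest

-- second loop of A: first col with 'badge' in col.lower()
def pvALoop2 (columns : List String) : Option String :=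
  match columns with
  | [] => none
  | col :: rest =>
    if PySem.Str.isIn "badge" (PySem.Str.lower col) then some col
    else pvALoop2 rest

def find_badge_number_column_py (columns : List String) : Option String :=
  match pvALoop1 columns with
  | some col => some col
  | none => pvALoop2 columns

-- ===== PORT B =====
-- single pass carrying the fallback (None until the first badge-only column)
def pvBLoop (columns : List String) (fallback : Option String) : Option String :=
  match columns with
  | [] => fallback
  | col :: rest =>
    let low := PySem.Str.lower col
    if PySem.Str.isIn "badge" low then
      if PySem.Str.isIn "num" low then some col
      else pvBLoop rest (if fallback.isNone then some col else fallback)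
    else pvBLoop rest fallback

def find_badge_number_column_py_alt (columns : List String) : Option String :=
  pvBLoop columns none

-- ===== PRECONDITION & SPEC =====
def Spec_find_badge_number_column_py (columns : List String) (out : Option String) : Prop := out = find_badge_number_column_py_alt columns
instance (columns : List String) (out : Option String) : Decidable (Spec_find_badge_number_column_py columns out) := by unfold Spec_find_badge_number_column_py; infer_instance

-- ===== CLAIM =====
def Claim_equal_find_badge_number_column_py : Prop := ∀ (columns : List String), Dom_find_badge_number_column_py columns → Spec_find_badge_number_column_py columns (find_badge_number_column_py columns)

-- ===== LEMMAS AND PROOFS =====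
-- the one-pass loop equals: first both-match, else the carried fallback, else first badge-match
theorem pvBLoop_eq (columns : List String) (fb : Option String) :
    pvBLoop columns fb = ((pvALoop1 columns).or (fb.or (pvALoop2 columns))) := by
  induction columns generalizing fb with
  | nil => simp [pvBLoop, pvALoop1, pvALoop2]
  | cons col rest ih =>
    simp only [pvBLoop, pvALoop1, pvALoop2, ih]
    split_ifs <;> try rfl
    all_goals cases fb <;> simp_all

-- ===== VERDICT =====
theorem find_badge_number_column_py_spec : Claim_equal_find_badge_number_column_py := by
  intro columns _
  unfold Spec_find_badge_number_column_py find_badge_number_column_py find_badge_number_column_py_alt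
  rw [pvBLoop_eq]
  cases h : pvALoop1 columns <;> simp
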